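-- pv_equiv track=rewrite | github.com/Phucgiacat/web_ui_ocr | align_han/align_han.py | _flatten_units
-- ===== SOURCE A (Python) =====
-- from typing import List, Tuple
--
-- def _flatten_units(text_items: List[str]) -> List[str]:
--     tokens: List[str] = []
--     word_mode = any((' ' in s) for s in text_items if s)
--     if word_mode:
--         for s in text_items:
--             if not s:
--                 continue
--             tokens.extend([t for t in s.split() if t])
--     else:
--         for s in text_items:
--             if not s:
--                 continue
--             tokens.extend(list(s))
--     return tokens
-- ===== SOURCE B (Python) =====
-- from typing import List
--
-- def _flatten_units(text_items: List[str]) -> List[str]: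
--     # Character-level scanner: no str.split(); one state machine over all chars.
--     word_mode = any(' ' in s for s in text_items)
--     if not word_mode:
--         return [c for s in text_items for c in s]
--     tokens: List[str] = []
--     buf: List[str] = []
--     for s in text_items:
--         for c in s:
--             if c.isspace():
--                 if buf:
--                     tokens.append(''.join(buf))
--                     buf = []
--             else:
--                 buf.append(c)
--         if buf:  # item boundary ends the current token
--             tokens.append(''.join(buf))
--             buf = []
--     return tokens
-- ===== Notes on version B (the rewrite author's own statement) =====
-- stated objective: alternative
-- what changed: Replaces A's per-item str.split() calls with a hand-written character-level tokenizer: one state machine over every character maintaining an explicit current-token buffer, flushing on whitespace and at item boundaries; correct because str.split() tokenizes by exactly that scan.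
import Mathlib
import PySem

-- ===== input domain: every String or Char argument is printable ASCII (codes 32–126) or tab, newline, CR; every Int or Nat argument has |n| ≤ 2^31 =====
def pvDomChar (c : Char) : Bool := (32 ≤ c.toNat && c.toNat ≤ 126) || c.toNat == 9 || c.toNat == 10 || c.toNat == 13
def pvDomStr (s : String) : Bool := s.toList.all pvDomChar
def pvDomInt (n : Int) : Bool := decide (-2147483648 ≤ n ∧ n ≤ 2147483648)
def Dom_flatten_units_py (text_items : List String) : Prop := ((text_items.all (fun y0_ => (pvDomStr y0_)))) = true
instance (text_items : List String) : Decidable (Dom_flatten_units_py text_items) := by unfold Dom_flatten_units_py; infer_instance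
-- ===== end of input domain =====

-- B replaces A's per-item str.split() calls with a hand-written character-level tokenizer (alternative; same cost).

-- ===== PORT A =====
-- literal port of A: word_mode over the non-empty items, then one of two
-- accumulator loops, each skipping empty strings ('if not s: continue').
def flatten_units_py (text_items : List String) : List String :=
  let word_mode := text_items.any (fun s => !s.toList.isEmpty && PySem.Str.isIn " " s)
  if word_mode then
    text_items.foldl (fun tokens s =>
      if s.toList.isEmpty then tokens
      else tokens ++ (PySem.Str.split₀ s).filter (fun t => !t.toList.isEmpty)) []
  else
    text_items.foldl (fun tokens s =>
      if s.toList.isEmpty then tokens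
      else tokens ++ s.toList.map (fun c => String.ofList [c])) []

-- ===== PORT B =====
-- literal port of B: a character-level state machine with an explicit token buffer.
-- fuStep = the inner 'for c in s' body; fuFlush = the item-boundary 'if buf: ...'.
def fuStep (st : List String × List Char) (c : Char) : List String × List Char :=
  if PySem.Chars.isspace c then
    if st.2.isEmpty then st else (st.1 ++ [String.ofList st.2], [])
  else (st.1, st.2 ++ [c])

def fuFlush (st : List String × List Char) : List String × List Char :=
  if st.2.isEmpty then st else (st.1 ++ [String.ofList st.2], [])

def flatten_units_py_alt (text_items : List String) : List String :=
  let word_mode := text_items.any (fun s => PySem.Str.isIn " " s)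
  if !word_mode then
    text_items.flatMap (fun s => s.toList.map (fun c => String.ofList [c]))
  else
    (text_items.foldl (fun st s => fuFlush (s.toList.foldl fuStep st)) ([], [])).1

-- ===== PRECONDITION & SPEC =====
def Spec_flatten_units_py (text_items : List String) (out : List String) : Prop := out = flatten_units_py_alt text_items
instance (text_items : List String) (out : List String) : Decidable (Spec_flatten_units_py text_items out) := by unfold Spec_flatten_units_py; infer_instance

-- ===== CLAIM (what is proved, stated in full; the proofs are below) =====
def Claim_equal_flatten_units_py : Prop := ∀ (text_items : List String), Dom_flatten_units_py text_items → Spec_flatten_units_py text_items (flatten_units_py text_items)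

-- ===== LEMMAS AND PROOFS =====

theorem go_nil (cur : List Char) (acc : List (List Char)) :
    PySem.Chars.split₀.go [] cur acc =
      if cur.isEmpty then acc.reverse else (cur.reverse :: acc).reverse := rfl

theorem go_cons (c : Char) (rest cur : List Char) (acc : List (List Char)) :
    PySem.Chars.split₀.go (c :: rest) cur acc =
      if PySem.Chars.isspace c then
        (if cur.isEmpty then PySem.Chars.split₀.go rest [] acc
         else PySem.Chars.split₀.go rest [] (cur.reverse :: acc))
      else PySem.Chars.split₀.go rest (c :: cur) acc := rfl

-- the accumulator can be pulled out in front
theorem go_acc (s : List Char) : ∀ (cur : List Char) (acc : List (List Char)),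
    PySem.Chars.split₀.go s cur acc = acc.reverse ++ PySem.Chars.split₀.go s cur [] := by
  induction s with
  | nil =>
      intro cur acc
      rw [go_nil, go_nil]
      split_ifs <;> simp
  | cons c rest ih =>
      intro cur acc
      rw [go_cons, go_cons]
      split_ifs with h1 h2
      · rw [ih [] acc]
      · rw [ih [] (cur.reverse :: acc)]
        try rw [ih [] [cur.reverse]]
        try simp
      · rw [ih (c :: cur) acc]
        try simp

-- split₀ produces no empty token
theorem go_no_empty (s : List Char) : ∀ (cur : List Char) (acc : List (List Char)),
    [] ∉ acc → [] ∉ PySem.Chars.split₀.go s cur acc := by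
  induction s with
  | nil =>
      intro cur acc hacc
      rw [go_nil]
      split_ifs with h
      · simpa using hacc
      · intro h1
        rcases List.mem_cons.mp (List.mem_reverse.mp h1) with h3 | h3
        · exact h (by simp [List.reverse_eq_nil_iff.mp h3.symm])
        · exact hacc h3
  | cons c rest ih =>
      intro cur acc hacc
      rw [go_cons]
      split_ifs with h1 h2
      · exact ih [] acc hacc
      · refine ih [] (cur.reverse :: acc) ?_
        intro h3
        rcases List.mem_cons.mp h3 with h4 | h4
        · exact h2 (by simp [List.reverse_eq_nil_iff.mp h4.symm])
        · exact hacc h4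
      · exact ih (c :: cur) acc hacc

theorem split₀_filter_ne_empty (s : String) :
    (PySem.Str.split₀ s).filter (fun t => !t.toList.isEmpty) = PySem.Str.split₀ s := by
  show (List.map String.ofList (PySem.Chars.split₀ s.toList)).filter _ =
       List.map String.ofList (PySem.Chars.split₀ s.toList)
  rw [List.filter_map]
  refine congrArg _ (List.filter_eq_self.mpr ?_)
  intro cs hcs
  have hne : cs ≠ [] := by
    intro hcs0
    subst hcs0
    exact go_no_empty s.toList [] [] (by simp) hcs
  simp [Function.comp, hne]

-- KEY: scanning one string's characters with B's state machine, then flushing,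
-- appends exactly that string's split₀ tokens and empties the buffer.
theorem inner_scan (cs : List Char) : ∀ (toks : List String) (buf : List Char),
    fuFlush (cs.foldl fuStep (toks, buf)) =
      (toks ++ (PySem.Chars.split₀.go cs buf.reverse []).map String.ofList, []) := by
  induction cs with
  | nil =>
      intro toks buf
      rw [List.foldl_nil, go_nil, fuFlush]
      by_cases h : buf.isEmpty = true
      · have h0 : buf = [] := by simpa using h
        simp [h0]
      · have h0 : buf ≠ [] := by simpa using h
        simp [h]
  | cons c rest ih =>
      intro toks buf
      rw [List.foldl_cons, go_cons]
      show fuFlush (rest.foldl fuStep (fuStep (toks, buf) c)) = _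
      by_cases hsp : PySem.Chars.isspace c = true
      · rw [if_pos hsp]
        by_cases hb : buf.isEmpty = true
        · have h0 : buf = [] := by simpa using hb
          have : fuStep (toks, buf) c = (toks, buf) := by simp [fuStep, hsp, hb]
          rw [this, ih toks buf, h0]
          simp
        · have h0 : buf ≠ [] := by simpa using hb
          have hc : (buf.reverse).isEmpty = false := by simpa using hb
          have : fuStep (toks, buf) c = (toks ++ [String.ofList buf], []) := by
            simp [fuStep, hsp, hb]
          rw [this, ih (toks ++ [String.ofList buf]) [], hc]
          simp only [Bool.false_eq_true, if_false]
          rw [go_acc rest [] [buf.reverse.reverse]]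
          simp
      · rw [if_neg hsp]
        have : fuStep (toks, buf) c = (toks, buf ++ [c]) := by simp [fuStep, hsp]
        rw [this, ih toks (buf ++ [c])]
        simp

-- outer loop: fold the scanner over the items starting with an empty buffer
theorem outer_scan (items : List String) : ∀ (T : List String),
    items.foldl (fun st s => fuFlush (s.toList.foldl fuStep st)) (T, ([] : List Char)) =
      (T ++ items.flatMap (fun s => (PySem.Chars.split₀ s.toList).map String.ofList), []) := by
  induction items with
  | nil => intro T; simp
  | cons s rest ih =>
      intro T
      rw [List.foldl_cons, inner_scan s.toList T [], List.reverse_nil, ih]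
      simp [PySem.Chars.split₀]

-- ===== VERDICT (by name: the statement is the Claim_ definition above) =====
theorem flatten_units_py_spec : Claim_equal_flatten_units_py := by
  intro items _
  simp only [Spec_flatten_units_py, flatten_units_py, flatten_units_py_alt]
  have hpt : ∀ s : String, (!s.toList.isEmpty && PySem.Str.isIn " " s) = PySem.Str.isIn " " s := by
    intro s
    cases he : s.toList.isEmpty
    · simp
    · have h0 : s.toList = [] := by simpa using he
      simp [PySem.Str.isIn, h0]
      decide
  simp only [hpt]
  by_cases h : items.any (fun s => PySem.Str.isIn " " s) = true
  · rw [if_pos h, h]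
    simp only [Bool.not_true, Bool.false_eq_true, if_false]
    have hbody : (fun (tokens : List String) (s : String) =>
        if s.toList.isEmpty then tokens
        else tokens ++ (PySem.Str.split₀ s).filter (fun t => !t.toList.isEmpty)) =
        (fun tokens s => tokens ++ PySem.Str.split₀ s) := by
      funext tokens s
      by_cases he : s.toList.isEmpty = true
      · have h0 : s.toList = [] := by simpa using he
        have hz : PySem.Str.split₀ s = [] := by
          show List.map String.ofList (PySem.Chars.split₀ s.toList) = []
          rw [h0]; rfl
        simp [he, hz]
      · rw [if_neg he, split₀_filter_ne_empty]
    rw [hbody, PySem.List.foldl_append_eq_flatMap PySem.Str.split₀ items [], outer_scan items []]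
    rfl
  · have hf : items.any (fun s => PySem.Str.isIn " " s) = false := by simpa using h
    rw [if_neg h, hf]
    simp only [Bool.not_false, if_true]
    have hbody : (fun (tokens : List String) (s : String) =>
        if s.toList.isEmpty then tokens
        else tokens ++ s.toList.map (fun c => String.ofList [c])) =
        (fun tokens s => tokens ++ s.toList.map (fun c => String.ofList [c])) := by
      funext tokens s
      by_cases he : s.toList.isEmpty = true
      · have h0 : s.toList = [] := by simpa using he
        simp [h0]
      · rw [if_neg he]
    rw [hbody, PySem.List.foldl_append_eq_flatMap (fun s => s.toList.map (fun c => String.ofList [c])) items []]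
    simp
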